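-- pv_equiv track=rewrite | github.com/wilson-elechouse/adv-qb-tool | scripts/ai_bridge.py | sanitize_for_cmd
-- ===== SOURCE A (Python) =====
-- def sanitize_for_cmd(message: str):
--     # prevent cmd metachar interpretation when calling .cmd wrappers
--     repl = {
--         "|": " / ",
--         "&": " and ",
--         "<": "(",
--         ">": ")",
--         "^": "",
--         "\r": " ",
--         "\n": " ",
--     }
--     s = str(message or "")
--     for k, v in repl.items():
--         s = s.replace(k, v)
--     return s
-- ===== SOURCE B (Python) =====
-- def sanitize_for_cmd(message: str):
--     # prevent cmd metachar interpretation when calling .cmd wrappers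
--     s = str(message or "")
--     out = []
--     for ch in s:
--         if ch == "|":
--             out.append(" / ")
--         elif ch == "&":
--             out.append(" and ")
--         elif ch == "<":
--             out.append("(")
--         elif ch == ">":
--             out.append(")")
--         elif ch == "^":
--             pass
--         elif ch == "\r" or ch == "\n":
--             out.append(" ")
--         else:
--             out.append(ch)
--     return "".join(out)
-- ===== Notes on version B (the rewrite author's own statement) =====
-- stated objective: alternative
-- what changed: B dispatches on each input character once in a single explicit loop (if/elif chain appending pieces to a list, joined at the end) instead of A's seven sequential full-string str.replace passes over the rule table; no speed is claimed since CPython's C-level replace is fast.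
import Mathlib
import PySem

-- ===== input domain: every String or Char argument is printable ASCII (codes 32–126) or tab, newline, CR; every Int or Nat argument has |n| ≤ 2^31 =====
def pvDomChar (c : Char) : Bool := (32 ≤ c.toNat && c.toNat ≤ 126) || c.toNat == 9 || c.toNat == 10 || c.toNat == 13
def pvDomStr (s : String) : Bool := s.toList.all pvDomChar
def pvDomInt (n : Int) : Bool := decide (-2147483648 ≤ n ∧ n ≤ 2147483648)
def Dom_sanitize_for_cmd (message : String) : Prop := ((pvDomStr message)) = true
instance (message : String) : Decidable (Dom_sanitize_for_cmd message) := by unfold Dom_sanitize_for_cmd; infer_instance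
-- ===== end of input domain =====

-- B replaces A's seven sequential full-string .replace passes by one explicit pass over the
-- input characters, dispatching each through an if/elif chain and joining the pieces (objective: alternative).


-- ===== PORT A =====
-- A's dict `repl` iterated as (key, value) pairs in insertion order
def pvReplA : List (String × String) :=
  [("|", " / "), ("&", " and "), ("<", "("), (">", ")"), ("^", ""), ("\r", " "), ("\n", " ")]

def sanitize_for_cmd (message : String) : String :=
  let s := if message == "" then "" else message   -- str(message or "")
  pvReplA.foldl (fun s kv => PySem.Str.replace s kv.1 kv.2) s

-- ===== PORT B =====
-- Source B's explicit character loop: for each ch an if/elif chain appends the replacement piece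
-- (or nothing for '^', or the character itself) to `out`; the loop is the structural recursion pvSanB
def pvSanB : List Char → List String
  | [] => []
  | c :: t =>
    if c = '|' then " / " :: pvSanB t
    else if c = '&' then " and " :: pvSanB t
    else if c = '<' then "(" :: pvSanB t
    else if c = '>' then ")" :: pvSanB t
    else if c = '^' then pvSanB t
    else if c = '\r' ∨ c = '\n' then " " :: pvSanB t
    else String.ofList [c] :: pvSanB t

def sanitize_for_cmd_alt (message : String) : String :=
  let s := if message == "" then "" else message   -- str(message or "")
  PySem.Str.join "" (pvSanB s.toList)              -- "".join(out)

-- ===== PRECONDITION & SPEC =====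
def Spec_sanitize_for_cmd (message : String) (out : String) : Prop := out = sanitize_for_cmd_alt message
instance (message : String) (out : String) : Decidable (Spec_sanitize_for_cmd message out) := by unfold Spec_sanitize_for_cmd; infer_instance

-- ===== CLAIM (what is proved, stated in full; the proofs are below) =====
def Claim_equal_sanitize_for_cmd : Prop := ∀ (message : String), Dom_sanitize_for_cmd message → Spec_sanitize_for_cmd message (sanitize_for_cmd message)

-- ===== LEMMAS AND PROOFS =====

-- the per-character replacement both programs implement
def pvG (c : Char) : List Char :=
  if c = '|' then [' ', '/', ' ']
  else if c = '&' then [' ', 'a', 'n', 'd', ' ']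
  else if c = '<' then ['(']
  else if c = '>' then [')']
  else if c = '^' then []
  else if c = '\r' ∨ c = '\n' then [' ']
  else [c]

-- single-character replacement is a flatMap over the characters
theorem pv_go_single (k : Char) (v : List Char) :
    ∀ (fuel : Nat) (l acc : List Char), l.length ≤ fuel →
      PySem.Chars.replace.go [k] v fuel l acc
        = acc.reverse ++ l.flatMap (fun c => if c = k then v else [c]) := by
  intro fuel
  induction fuel with
  | zero =>
    intro l acc h
    have : l = [] := List.eq_nil_of_length_eq_zero (Nat.le_zero.mp h)
    subst this
    simp [PySem.Chars.replace.go]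
  | succ n ih =>
    intro l acc h
    cases l with
    | nil => simp [PySem.Chars.replace.go]
    | cons c t =>
      rw [PySem.Chars.replace.go]
      by_cases hc : c = k
      · subst hc
        have hp : List.isPrefixOf [c] (c :: t) = true := by simp [List.isPrefixOf]
        simp only [hp, if_true]
        rw [ih _ _ (by simpa using Nat.le_of_succ_le_succ h)]
        simp
      · have hp : List.isPrefixOf [k] (c :: t) = false := by
          simp [List.isPrefixOf]
          exact fun h' => (hc h'.symm).elim
        simp only [hp, Bool.false_eq_true, if_false]
        rw [ih _ _ (by simpa using Nat.le_of_succ_le_succ h)]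
        simp [hc]

theorem pv_replace_single (s : List Char) (k : Char) (v : List Char) :
    PySem.Chars.replace s [k] v = s.flatMap (fun c => if c = k then v else [c]) := by
  rw [PySem.Chars.replace]
  simp [pv_go_single k v s.length s [] (le_refl _)]

theorem pv_join_nil_eq_flatten (l : List (List Char)) :
    PySem.Chars.join [] l = l.flatten := by
  induction l with
  | nil => simp [PySem.Chars.join, List.intercalate, List.intersperse]
  | cons x xs ih =>
    cases xs with
    | nil => simp [PySem.Chars.join, List.intercalate, List.intersperse]
    | cons y ys =>
      simp [PySem.Chars.join, List.intercalate, List.intersperse] at ih ⊢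
      simpa using ih

-- B's loop flattens to a flatMap of pvG
theorem pv_sanB_flatten (l : List Char) :
    ((pvSanB l).map String.toList).flatten = l.flatMap pvG := by
  induction l with
  | nil => simp [pvSanB]
  | cons c t ih =>
    rw [pvSanB]
    split_ifs with h1 h2 h3 h4 h5 h6 <;>
      simp_all [pvG, List.flatMap_cons]

-- A's composed single-character replacements agree with pvG characterwise
theorem pv_char_step (c : Char) :
    (List.flatMap
      (fun x =>
        List.flatMap
          (fun x =>
            List.flatMap
              (fun x =>
                List.flatMap
                  (fun x =>
                    List.flatMap
                      (fun x =>
                        List.flatMap (fun c => if c = '\n' then [' '] else [c])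
                          (if x = '\r' then [' '] else [x]))
                      (if x = '^' then [] else [x]))
                  (if x = '>' then [')'] else [x]))
              (if x = '<' then ['('] else [x]))
          (if x = '&' then [' ', 'a', 'n', 'd', ' '] else [x]))
      (if c = '|' then [' ', '/', ' '] else [c]))
      = pvG c := by
  by_cases h1 : c = '|'; · subst h1; decide
  by_cases h2 : c = '&'; · subst h2; decide
  by_cases h3 : c = '<'; · subst h3; decide
  by_cases h4 : c = '>'; · subst h4; decide
  by_cases h5 : c = '^'; · subst h5; decide
  by_cases h6 : c = '\r'; · subst h6; decide
  by_cases h7 : c = '\n'; · subst h7; decide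
  simp [pvG, h1, h2, h3, h4, h5, h6, h7]

-- ===== VERDICT (by name: the statement is the Claim_ definition above) =====
theorem sanitize_for_cmd_spec : Claim_equal_sanitize_for_cmd := by
  intro message _
  unfold Spec_sanitize_for_cmd sanitize_for_cmd sanitize_for_cmd_alt
  set s := if message == "" then "" else message with hs
  simp only [pvReplA, List.foldl, PySem.Str.replace, PySem.Str.join]
  apply congrArg String.ofList
  simp only [String.toList_ofList]
  have e1 : "|".toList = ['|'] := rfl
  have e2 : "&".toList = ['&'] := rfl
  have e3 : "<".toList = ['<'] := rfl
  have e4 : ">".toList = ['>'] := rfl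
  have e5 : "^".toList = ['^'] := rfl
  have e6 : "\r".toList = ['\r'] := rfl
  have e7 : "\n".toList = ['\n'] := rfl
  have v1 : " / ".toList = [' ', '/', ' '] := rfl
  have v2 : " and ".toList = [' ', 'a', 'n', 'd', ' '] := rfl
  have v3 : "(".toList = ['('] := rfl
  have v4 : ")".toList = [')'] := rfl
  have v5 : "".toList = [] := rfl
  have v6 : " ".toList = [' '] := rfl
  rw [e1, e2, e3, e4, e5, e6, e7, v1, v2, v3, v4, v5, v6]
  simp only [pv_replace_single]
  rw [pv_join_nil_eq_flatten, pv_sanB_flatten]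
  simp only [List.flatMap_assoc]
  congr 1
  funext c
  exact pv_char_step c
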